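-- pv_equiv track=rewrite | github.com/rodrigue11111/CPB_trained_model | app/pages/6_Formules.py | _latex_label
-- ===== SOURCE A (Python) =====
-- def _latex_label(text: str) -> str:
--     """Rend un libellé LaTeX sûr (sans caractères spéciaux non échappés)."""
--     if not text:
--         return "\\mathrm{}"
--     # Normalisation simple : on remplace les caractères problématiques.
--     cleaned = []
--     for ch in text:
--         if ch.isalnum():
--             # Evite les caractères non-ASCII (µ, etc.) qui cassent KaTeX.
--             cleaned.append(ch if ch.isascii() else "_")
--         elif ch in {" ", "-", "/", "%", "(", ")", "[", "]"}:
--             cleaned.append("_")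
--         elif ch == "=":
--             cleaned.append("=")
--         elif ch in {".", "_"}:
--             cleaned.append("_")
--         else:
--             cleaned.append("_")
--     label = "".join(cleaned)
--     while "__" in label:
--         label = label.replace("__", "_")
--     label = label.strip("_")
--     # Echappe les underscores pour éviter les sous-indices accidentels.
--     label = label.replace("_", "\\_")
--     return f"\\mathrm{{{label}}}"
-- ===== SOURCE B (Python) =====
-- def _latex_label(text: str) -> str:
--     """Rend un libellé LaTeX sûr: tokenisation en segments autorisés, joints par '\\_'."""
--     if not text:
--         return "\\mathrm{}"
--     # Split the text into maximal runs of allowed characters (ascii alnum or '='),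
--     # then join the non-empty runs with the escaped separator.
--     tokens = []
--     cur = []
--     for ch in text:
--         if ("0" <= ch <= "9") or ("A" <= ch <= "Z") or ("a" <= ch <= "z") or ch == "=":
--             cur.append(ch)
--         else:
--             if cur:
--                 tokens.append("".join(cur))
--                 cur = []
--     if cur:
--         tokens.append("".join(cur))
--     return "\\mathrm{" + "\\_".join(tokens) + "}"
-- ===== Notes on version B (the rewrite author's own statement) =====
-- stated objective: simpler
-- what changed: B replaces A's map-each-char-to-underscore, collapse-'__'-by-repeated-replace, strip, escape pipeline by a single pass that collects maximal runs of allowed characters (ascii alphanumerics and '=') and joins them with the escaped separator '\_'.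
import Mathlib
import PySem

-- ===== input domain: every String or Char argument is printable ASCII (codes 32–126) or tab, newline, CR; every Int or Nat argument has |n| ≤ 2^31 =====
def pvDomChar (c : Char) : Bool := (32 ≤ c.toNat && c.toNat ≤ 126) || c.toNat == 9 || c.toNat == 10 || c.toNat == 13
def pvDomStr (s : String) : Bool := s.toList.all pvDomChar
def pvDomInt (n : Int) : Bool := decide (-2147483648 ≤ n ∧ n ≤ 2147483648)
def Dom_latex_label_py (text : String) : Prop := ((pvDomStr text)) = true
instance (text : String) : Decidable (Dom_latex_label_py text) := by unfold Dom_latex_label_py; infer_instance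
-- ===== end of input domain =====

-- B tokenizes the text into maximal runs of allowed characters joined by '\_' instead of A's map/collapse/strip/escape pipeline (objective: simpler).


-- ===== PORT A =====
-- ch.isascii() has no PySem primitive; ported by hand as 'code point ≤ 127' (exact: isascii is U+0000..U+007F).
def pvIsAscii (c : Char) : Bool := c.toNat ≤ 127

-- the body of A's for-loop, per character
def pvCleanChar (c : Char) : Char :=
  if PySem.Chars.isalnum c then (if pvIsAscii c then c else '_')
  else if c ∈ [' ', '-', '/', '%', '(', ')', '[', ']'] then '_'
  else if c = '=' then '='
  else if c ∈ ['.', '_'] then '_'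
  else '_'

-- A's 'while "__" in label: label = label.replace("__", "_")' loop; every pass with "__"
-- present strictly shortens the label, so label.length units of fuel always reach the fixpoint.
def pvCollapse : Nat → List Char → List Char
  | 0, label => label
  | fuel + 1, label =>
    if PySem.Chars.isIn ['_', '_'] label then
      pvCollapse fuel (PySem.Chars.replace label ['_', '_'] ['_'])
    else label

def latex_label_py (text : String) : String :=
  if text = "" then "\\mathrm{}"
  else
    let cleaned := text.toList.map pvCleanChar
    let label1 := pvCollapse cleaned.length cleaned
    let label2 := PySem.Chars.stripChars label1 ['_']
    let label3 := PySem.Chars.replace label2 ['_'] ['\\', '_']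
    String.ofList ("\\mathrm{".toList ++ label3 ++ ['}'])

-- ===== PORT B =====
-- Source B's allowed-character test: '0'<=ch<='9' or 'A'<=ch<='Z' or 'a'<=ch<='z' or ch == '='
def pvAllowed (c : Char) : Bool :=
  (decide ('0' ≤ c) && decide (c ≤ '9')) || (decide ('A' ≤ c) && decide (c ≤ 'Z')) ||
    (decide ('a' ≤ c) && decide (c ≤ 'z')) || (c == '=')

-- Source B's for-loop over the characters, with state (cur, tokens); the trailing
-- 'if cur: tokens.append(...)' is the [] case.
def pvTokLoop : List Char → List Char → List (List Char) → List (List Char)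
  | [], cur, toks => if cur ≠ [] then toks ++ [cur] else toks
  | c :: t, cur, toks =>
    if pvAllowed c then pvTokLoop t (cur ++ [c]) toks
    else pvTokLoop t [] (if cur ≠ [] then toks ++ [cur] else toks)

def latex_label_py_alt (text : String) : String :=
  if text = "" then "\\mathrm{}"
  else
    String.ofList ("\\mathrm{".toList ++ PySem.Chars.join ['\\', '_'] (pvTokLoop text.toList [] []) ++ ['}'])

-- ===== PRECONDITION & SPEC =====
def Spec_latex_label_py (text : String) (out : String) : Prop := out = latex_label_py_alt text
instance (text : String) (out : String) : Decidable (Spec_latex_label_py text out) := by unfold Spec_latex_label_py; infer_instance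

-- ===== CLAIM (what is proved, stated in full; the proofs are below) =====
def Claim_equal_latex_label_py : Prop := ∀ (text : String), Dom_latex_label_py text → Spec_latex_label_py text (latex_label_py text)

-- ===== LEMMAS AND PROOFS =====

def pvF (c : Char) : Char := if pvAllowed c then c else '_'

def pvRep : List Char → List Char
  | [] => []
  | [c] => [c]
  | a :: b :: t => if a = '_' ∧ b = '_' then '_' :: pvRep t else a :: pvRep (b :: t)

def pvSqueeze : List Char → List Char
  | [] => []
  | c :: t =>
    if c = '_' then '_' :: pvSqueeze (t.dropWhile (· == '_'))
    else c :: pvSqueeze t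
termination_by l => l.length
decreasing_by
  · have := List.length_dropWhile_le (· == '_') t; simp; omega
  · simp

def pvEsc : List Char → List Char
  | [] => []
  | c :: t => (if c = '_' then ['\\', '_'] else [c]) ++ pvEsc t

theorem rep_cons (b : Char) (t : List Char) : ∃ r, pvRep (b :: t) = b :: r := by
  match t with
  | [] => exact ⟨[], by simp [pvRep]⟩
  | c :: t' =>
    by_cases h : b = '_' ∧ c = '_'
    · exact ⟨pvRep t', by simp [pvRep, h, h.1]⟩
    · exact ⟨pvRep (c :: t'), by simp [pvRep, h]⟩

theorem sq_rep (s : List Char) :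
    pvSqueeze (pvRep s) = pvSqueeze s ∧
      pvSqueeze ((pvRep s).dropWhile (· == '_')) = pvSqueeze (s.dropWhile (· == '_')) := by
  match s with
  | [] => simp [pvRep]
  | [c] => simp [pvRep]
  | a :: b :: t =>
    by_cases ha : a = '_'
    · subst ha
      by_cases hb : b = '_'
      · subst hb
        have ih := sq_rep t
        refine ⟨?_, ?_⟩
        · simp [pvRep, pvSqueeze, List.dropWhile, ih.2]
        · simp [pvRep, List.dropWhile, ih.2]
      · have hb' : (b == '_') = false := by simp [hb]
        have ih := sq_rep (b :: t)
        obtain ⟨r, hr⟩ := rep_cons b t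
        have hrep : pvRep ('_' :: b :: t) = '_' :: b :: r := by
          simp [pvRep, hb, hr]
        refine ⟨?_, ?_⟩
        · rw [hrep]
          have h1 := ih.1
          rw [hr] at h1
          simp [pvSqueeze, List.dropWhile, hb', hb, h1]
        · rw [hrep]
          have h1 := ih.1
          rw [hr] at h1
          simp [List.dropWhile, hb', hb, pvSqueeze, h1]
    · have ha' : (a == '_') = false := by simp [ha]
      have ih := sq_rep (b :: t)
      have hrep : pvRep (a :: b :: t) = a :: pvRep (b :: t) := by
        simp [pvRep]; intro h _; exact absurd h ha
      refine ⟨?_, ?_⟩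
      · simp [hrep, pvSqueeze, ha, ih.1]
      · simp [hrep, List.dropWhile, ha', pvSqueeze, ha, ih.1]

theorem squeeze_self (s : List Char) (h : ¬ ['_', '_'] <:+: s) : pvSqueeze s = s := by
  match s with
  | [] => simp [pvSqueeze]
  | c :: t =>
    have ht : ¬ ['_', '_'] <:+: t := fun hi => h (hi.trans (List.suffix_cons c t).isInfix)
    by_cases hc : c = '_'
    · subst hc
      have hhd : t.dropWhile (· == '_') = t := by
        match t with
        | [] => simp
        | d :: t' =>
          have hd : d ≠ '_' := by
            intro hd; subst hd
            exact h (List.infix_iff_prefix_suffix.mpr ⟨'_' :: '_' :: t', by simp, by simp⟩)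
          have hd' : (d == '_') = false := by simp [hd]
          simp [List.dropWhile, hd']
      simp [pvSqueeze, hhd, squeeze_self t ht]
    · simp [pvSqueeze, hc, squeeze_self t ht]

theorem rep_length_le (s : List Char) : (pvRep s).length ≤ s.length := by
  match s with
  | [] => simp [pvRep]
  | [c] => simp [pvRep]
  | a :: b :: t =>
    have h1 := rep_length_le t
    have h2 := rep_length_le (b :: t)
    by_cases h : a = '_' ∧ b = '_' <;> simp [pvRep, h] <;> simp at h2 <;> omega

theorem rep_length_lt (s : List Char) (h : ['_', '_'] <:+: s) : (pvRep s).length < s.length := by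
  match s with
  | [] => simp at h
  | [c] => rcases h with ⟨p, q, hpq⟩; apply_fun List.length at hpq; simp at hpq; omega
  | a :: b :: t =>
    by_cases hab : a = '_' ∧ b = '_'
    · have := rep_length_le t; simp [pvRep, hab]; omega
    · have htl : ['_', '_'] <:+: b :: t := by
        rcases (List.infix_cons_iff.mp h) with hp | hi
        · exfalso
          rcases hp with ⟨q, hq⟩
          apply hab
          constructor
          · exact (List.cons_eq_cons.mp hq).1.symm
          · have := (List.cons_eq_cons.mp hq).2
            exact (List.cons_eq_cons.mp this).1.symm
        · exact hi
      have := rep_length_lt (b :: t) htl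
      simp [pvRep, hab] at this ⊢
      omega

theorem go_rep : ∀ (fuel : Nat) (l acc : List Char), l.length ≤ fuel →
    PySem.Chars.replace.go ['_', '_'] ['_'] fuel l acc = acc.reverse ++ pvRep l := by
  intro fuel
  induction fuel with
  | zero =>
    intro l acc h
    match l with
    | [] => simp [PySem.Chars.replace.go, pvRep]
    | c :: t => simp at h
  | succ n ih =>
    intro l acc h
    match l with
    | [] => simp [PySem.Chars.replace.go, pvRep]
    | [c] =>
      simp only [PySem.Chars.replace.go]
      by_cases hc : c = '_'
      · subst hc
        simp [List.isPrefixOf, pvRep, PySem.Chars.replace.go]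
        rw [ih [] _ (by simp)]
        simp [pvRep]
      · simp [List.isPrefixOf, Ne.symm hc, pvRep]
        rw [ih [] _ (by simp)]
        simp [pvRep]
    | a :: b :: t =>
      simp only [PySem.Chars.replace.go]
      by_cases hab : a = '_' ∧ b = '_'
      · obtain ⟨ha, hb⟩ := hab; subst ha; subst hb
        simp [List.isPrefixOf]
        rw [ih t _ (by simp at h ⊢; omega)]
        simp [pvRep]
      · have hpre : List.isPrefixOf ['_', '_'] (a :: b :: t) = false := by
          simp [List.isPrefixOf]
          intro h1 h2
          exact hab ⟨h1.symm, h2.symm⟩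
        simp only [hpre, Bool.false_eq_true, if_false]
        rw [ih (b :: t) _ (by simp at h ⊢; omega)]
        simp [pvRep, hab]

theorem replace_us (s : List Char) : PySem.Chars.replace s ['_', '_'] ['_'] = pvRep s := by
  have h0 : PySem.Chars.replace s ['_', '_'] ['_'] = PySem.Chars.replace.go ['_', '_'] ['_'] s.length s [] := by
    simp [PySem.Chars.replace]
  rw [h0, go_rep s.length s [] le_rfl]
  simp

theorem collapse_eq_squeeze (fuel : Nat) (s : List Char) (h : s.length ≤ fuel) :
    pvCollapse fuel s = pvSqueeze s := by
  induction fuel generalizing s with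
  | zero =>
    have : s = [] := by simpa using List.length_eq_zero_iff.mp (Nat.le_zero.mp h)
    subst this; simp [pvCollapse, pvSqueeze]
  | succ n ih =>
    simp only [pvCollapse]
    by_cases hin : PySem.Chars.isIn ['_', '_'] s = true
    · have hinf : ['_', '_'] <:+: s := (PySem.Chars.isIn_iff_infix _ _).mp hin
      rw [if_pos hin, replace_us, ih (pvRep s) (by have := rep_length_lt s hinf; omega)]
      exact (sq_rep s).1
    · rw [if_neg hin]
      rw [Bool.not_eq_true] at hin
      exact (squeeze_self s ((PySem.Chars.isIn_eq_false_iff _ _).mp hin)).symm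

theorem go_esc : ∀ (fuel : Nat) (l acc : List Char), l.length ≤ fuel →
    PySem.Chars.replace.go ['_'] ['\\', '_'] fuel l acc = acc.reverse ++ pvEsc l := by
  intro fuel
  induction fuel with
  | zero =>
    intro l acc h
    match l with
    | [] => simp [PySem.Chars.replace.go, pvEsc]
    | c :: t => simp at h
  | succ n ih =>
    intro l acc h
    match l with
    | [] => simp [PySem.Chars.replace.go, pvEsc]
    | c :: t =>
      simp only [PySem.Chars.replace.go]
      by_cases hc : c = '_'
      · subst hc
        simp [List.isPrefixOf]
        rw [ih t _ (by simp at h; omega)]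
        simp [pvEsc]
      · have hpre : List.isPrefixOf ['_'] (c :: t) = false := by
          simp [List.isPrefixOf]; exact fun h1 => hc h1.symm
        simp only [hpre, Bool.false_eq_true, if_false]
        rw [ih t _ (by simp at h; omega)]
        simp [pvEsc, hc]

theorem replace_esc (s : List Char) : PySem.Chars.replace s ['_'] ['\\', '_'] = pvEsc s := by
  have h0 : PySem.Chars.replace s ['_'] ['\\', '_'] = PySem.Chars.replace.go ['_'] ['\\', '_'] s.length s [] := by
    simp [PySem.Chars.replace]
  rw [h0, go_esc s.length s [] le_rfl]
  simp

theorem allowed_ne_us {c : Char} (h : pvAllowed c = true) : c ≠ '_' := by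
  intro hc; subst hc; simp [pvAllowed] at h

theorem f_ok {c : Char} (h : pvAllowed c = true) : pvF c = c := by simp [pvF, h]

theorem f_no {c : Char} (h : pvAllowed c = false) : pvF c = '_' := by simp [pvF, h]

theorem f_us_comp : ((fun x => x == '_') ∘ pvF) = (fun c => !pvAllowed c) := by
  funext c
  by_cases h : pvAllowed c = true
  · simp [Function.comp, f_ok h, allowed_ne_us h, h]
  · rw [Bool.not_eq_true] at h; simp [Function.comp, f_no h, h]

theorem S_cons_ok (c : Char) (t : List Char) (h : pvAllowed c = true) :
    pvSqueeze ((c :: t).map pvF) = c :: pvSqueeze (t.map pvF) := by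
  simp [f_ok h, pvSqueeze, allowed_ne_us h]

theorem S_cons_no (c : Char) (t : List Char) (h : pvAllowed c = false) :
    pvSqueeze ((c :: t).map pvF) =
      '_' :: pvSqueeze ((t.dropWhile (fun c => !pvAllowed c)).map pvF) := by
  simp only [List.map_cons, f_no h]
  rw [show pvSqueeze ('_' :: t.map pvF) = '_' :: pvSqueeze ((t.map pvF).dropWhile (· == '_')) from by simp [pvSqueeze]]
  rw [List.dropWhile_map, f_us_comp]

-- the predicate stripChars uses

theorem contains_us (c : Char) : (['_'] : List Char).contains c = (c == '_') := by
  simp [List.contains_cons]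
  by_cases h : c = '_' <;> simp [h]

def pvRstU (s : List Char) : List Char := (s.reverse.dropWhile (· == '_')).reverse

theorem rstU_empty_iff (s : List Char) : pvRstU s = [] ↔ s.reverse.dropWhile (· == '_') = [] := by
  simp [pvRstU]

theorem rstU_cons {c : Char} (x : List Char) (hc : c ≠ '_') : pvRstU (c :: x) = c :: pvRstU x := by
  have hc' : (c == '_') = false := by simp [hc]
  simp only [pvRstU, List.reverse_cons, List.dropWhile_append]
  by_cases h : (x.reverse.dropWhile (· == '_')).isEmpty = true
  · simp [h, List.dropWhile, hc', List.isEmpty_iff.mp h]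
  · simp [h]

theorem rstU_app_us (x : List Char) : pvRstU (x ++ ['_']) = pvRstU x := by
  simp [pvRstU, List.dropWhile]

theorem rstU_all_ok (x : List Char) (h : x.all pvAllowed = true) : pvRstU x = x := by
  induction x with
  | nil => rfl
  | cons c t ih =>
    simp only [List.all_cons, Bool.and_eq_true] at h
    rw [rstU_cons t (allowed_ne_us h.1), ih h.2]

theorem rstU_app (a b : List Char) (h : pvRstU b ≠ []) : pvRstU (a ++ b) = a ++ pvRstU b := by
  have hb : b.reverse.dropWhile (· == '_') ≠ [] := fun hh => h ((rstU_empty_iff b).mpr hh)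
  simp only [pvRstU, List.reverse_append, List.dropWhile_append]
  simp [List.isEmpty_iff, hb]

theorem tok_acc (l : List Char) : ∀ cur toks, pvTokLoop l cur toks = toks ++ pvTokLoop l cur [] := by
  induction l with
  | nil => intro cur toks; by_cases h : cur = [] <;> simp [pvTokLoop, h]
  | cons c t ih =>
    intro cur toks
    by_cases hc : pvAllowed c = true
    · simp only [pvTokLoop, hc, if_true]; exact ih _ _
    · have hc' : pvAllowed c = false := by simpa using hc
      simp only [pvTokLoop, hc', Bool.false_eq_true, if_false]
      by_cases h : cur = []
      · subst h; simpa using ih [] toks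
      · simp only [h, ne_eq, not_false_iff, if_true, List.nil_append]
        rw [ih [] (toks ++ [cur]), ih [] [cur]]
        simp

theorem tok_ne (l : List Char) : ∀ cur, cur ≠ [] → pvTokLoop l cur [] ≠ [] := by
  induction l with
  | nil => intro cur h; simp [pvTokLoop, h]
  | cons c t ih =>
    intro cur h
    by_cases hc : pvAllowed c = true
    · simp only [pvTokLoop, hc, if_true]; exact ih _ (by simp)
    · have hc' : pvAllowed c = false := by simpa using hc
      simp only [pvTokLoop, hc', Bool.false_eq_true, if_false, h, ne_eq, not_false_iff, if_true]
      rw [tok_acc]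
      simp

theorem tok_drop (l : List Char) : pvTokLoop (l.dropWhile (fun c => !pvAllowed c)) [] [] = pvTokLoop l [] [] := by
  induction l with
  | nil => rfl
  | cons c t ih =>
    by_cases hc : pvAllowed c = true
    · simp [List.dropWhile, hc]
    · have hc' : pvAllowed c = false := by simpa using hc
      simp only [List.dropWhile, hc', Bool.not_false]
      rw [ih]
      simp [pvTokLoop, hc']

theorem tok_all_ok (l : List Char) : ∀ cur toks, cur.all pvAllowed = true →
    (∀ x ∈ toks, x.all pvAllowed = true) → ∀ x ∈ pvTokLoop l cur toks, x.all pvAllowed = true := by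
  induction l with
  | nil =>
    intro cur toks hcur htoks x hx
    by_cases h : cur = []
    · simp only [pvTokLoop, h, ne_eq, not_true_eq_false, if_false] at hx
      exact htoks x hx
    · simp only [pvTokLoop, ne_eq, h, not_false_iff, if_true, List.mem_append,
        List.mem_singleton] at hx
      rcases hx with hx | hx
      · exact htoks x hx
      · subst hx; exact hcur
  | cons c t ih =>
    intro cur toks hcur htoks x hx
    by_cases hc : pvAllowed c = true
    · simp only [pvTokLoop, hc, if_true] at hx
      exact ih _ _ (by simp [hcur, hc]) htoks x hx
    · have hc' : pvAllowed c = false := by simpa using hc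
      simp only [pvTokLoop, hc', Bool.false_eq_true, if_false] at hx
      by_cases h : cur = []
      · simp only [h, ne_eq, not_true_eq_false] at hx
        simp at hx
        exact ih _ _ (by simp) htoks x hx
      · simp only [h, ne_eq, not_false_iff, if_true] at hx
        refine ih _ _ (by simp) ?_ x hx
        intro y hy
        simp at hy
        rcases hy with hy | hy
        · exact htoks y hy
        · subst hy; exact hcur

def pvPfx : List Char → List Char
  | [] => []
  | c :: _ => if pvAllowed c then [] else ['_']

theorem drop_head_ok (t : List Char) :
    t.dropWhile (fun c => !pvAllowed c) = [] ∨
      ∃ c u, t.dropWhile (fun c => !pvAllowed c) = c :: u ∧ pvAllowed c = true := by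
  induction t with
  | nil => left; rfl
  | cons c t ih =>
    by_cases hc : pvAllowed c = true
    · right; exact ⟨c, t, by simp [List.dropWhile, hc], hc⟩
    · have hc' : pvAllowed c = false := by simpa using hc
      simpa [List.dropWhile, hc'] using ih

theorem pfx_drop (t : List Char) : pvPfx (t.dropWhile (fun c => !pvAllowed c)) = [] := by
  rcases drop_head_ok t with h | ⟨c, u, h, hok⟩
  · rw [h]; rfl
  · rw [h]; simp [pvPfx, hok]

theorem rstU_us_cons (x : List Char) (h : pvRstU x ≠ []) : pvRstU ('_' :: x) = '_' :: pvRstU x := by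
  have hx : x.reverse.dropWhile (· == '_') ≠ [] := fun hh => h ((rstU_empty_iff x).mpr hh)
  simp only [pvRstU, List.reverse_cons, List.dropWhile_append]
  simp [List.isEmpty_iff, hx]

theorem inter_cons (sep x : List Char) (ys : List (List Char)) (h : ys ≠ []) :
    List.intercalate sep (x :: ys) = x ++ sep ++ List.intercalate sep ys := by
  match ys with
  | [] => exact absurd rfl h
  | y :: zs => simp [List.intercalate, List.intersperse]

theorem main_r (l cur : List Char) (hcur : cur.all pvAllowed = true) :
    pvRstU (cur ++ pvSqueeze (l.map pvF)) =
      if pvTokLoop l cur [] = [] then []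
      else (if cur = [] then pvPfx l else []) ++ List.intercalate ['_'] (pvTokLoop l cur []) := by
  match l with
  | [] =>
    have hsq : pvSqueeze (List.map pvF []) = [] := by simp [pvSqueeze]
    rw [hsq, List.append_nil, rstU_all_ok cur hcur]
    by_cases h : cur = []
    · simp [pvTokLoop, h]
    · simp [pvTokLoop, h, List.intercalate]
  | c :: t =>
    by_cases hc : pvAllowed c = true
    · rw [S_cons_ok c t hc]
      have ih := main_r t (cur ++ [c]) (by simp [hcur, hc])
      have hne : pvTokLoop t (cur ++ [c]) [] ≠ [] := tok_ne t _ (by simp)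
      have htok : pvTokLoop (c :: t) cur [] = pvTokLoop t (cur ++ [c]) [] := by
        simp [pvTokLoop, hc]
      rw [show cur ++ c :: pvSqueeze (t.map pvF) = (cur ++ [c]) ++ pvSqueeze (t.map pvF) from by simp]
      rw [ih, htok]
      simp [hne, pvPfx, hc]
    · have hc' : pvAllowed c = false := by simpa using hc
      rw [S_cons_no c t hc']
      set t' := t.dropWhile (fun c => !pvAllowed c) with ht'
      have ih := main_r t' [] rfl
      simp only [List.nil_append] at ih
      have htokd : pvTokLoop t' [] [] = pvTokLoop t [] [] := tok_drop t
      have hp : pvPfx t' = [] := by rw [ht']; exact pfx_drop t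
      have htok : pvTokLoop (c :: t) cur [] =
          (if cur = [] then [] else [cur]) ++ pvTokLoop t [] [] := by
        by_cases h : cur = []
        · simp [pvTokLoop, hc', h]
        · simp only [pvTokLoop, hc', Bool.false_eq_true, if_false, ne_eq, h, not_false_iff,
            if_true, List.nil_append]
          rw [tok_acc]
      by_cases htt : pvTokLoop t [] [] = []
      · have ht'nil : t' = [] := by
          rcases drop_head_ok t with h0 | ⟨c', u, h0, hok⟩
          · rw [ht']; exact h0
          · exfalso
            apply tok_ne u [c'] (by simp)
            rw [← htokd, ht', h0] at htt
            simpa [pvTokLoop, hok] using htt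
        rw [ht'nil]
        have hsq : ('_' :: pvSqueeze (List.map pvF [])) = ['_'] := by simp [pvSqueeze]
        rw [show cur ++ '_' :: pvSqueeze (List.map pvF []) = cur ++ ('_' :: pvSqueeze (List.map pvF [])) from rfl]
        rw [hsq, rstU_app_us cur, rstU_all_ok cur hcur, htok, htt]
        by_cases h : cur = []
        · simp [h]
        · simp [h, List.intercalate]
      · have htt' : pvTokLoop t' [] [] ≠ [] := by rw [htokd]; exact htt
        obtain ⟨c', u, h0, hok⟩ : ∃ c u, t' = c :: u ∧ pvAllowed c = true := by
          rcases drop_head_ok t with h0 | ⟨c', u, h0, hok⟩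
          · exfalso; rw [← htokd, ht', h0] at htt; exact htt rfl
          · exact ⟨c', u, by rw [ht']; exact h0, hok⟩
        have hSne : pvRstU (pvSqueeze (t'.map pvF)) = List.intercalate ['_'] (pvTokLoop t' [] []) := by
          rw [ih]
          simp [htt', hp]
        have hScons : ∃ r, pvRstU (pvSqueeze (t'.map pvF)) = c' :: r := by
          rw [h0, S_cons_ok c' u hok, rstU_cons _ (allowed_ne_us hok)]
          exact ⟨_, rfl⟩
        obtain ⟨r, hr⟩ := hScons
        have hus : pvRstU ('_' :: pvSqueeze (t'.map pvF)) = '_' :: pvRstU (pvSqueeze (t'.map pvF)) :=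
          rstU_us_cons _ (by rw [hr]; simp)
        rw [show cur ++ '_' :: pvSqueeze (t'.map pvF) = cur ++ ('_' :: pvSqueeze (t'.map pvF)) from rfl]
        rw [rstU_app cur _ (by rw [hus, hr]; simp), hus, hSne, htokd, htok]
        by_cases h : cur = []
        · simp [h, pvPfx, hc', htt]
        · have hcc : (if cur = [] then ([] : List (List Char)) else [cur]) = [cur] := by simp [h]
          rw [hcc]
          have hne2 : ([cur] ++ pvTokLoop t [] []) ≠ [] := by simp
          rw [if_neg hne2, if_neg h]
          rw [show ([cur] ++ pvTokLoop t [] []) = cur :: pvTokLoop t [] [] from rfl]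
          rw [inter_cons ['_'] cur _ htt]
          simp
termination_by l.length
decreasing_by
  · simp
  · have := List.length_dropWhile_le (fun c => !pvAllowed c) t; simp; omega

theorem lst_S (l : List Char) :
    (pvSqueeze (l.map pvF)).dropWhile (· == '_') =
      pvSqueeze ((l.dropWhile (fun c => !pvAllowed c)).map pvF) := by
  match l with
  | [] => simp [pvSqueeze]
  | c :: t =>
    by_cases hc : pvAllowed c = true
    · rw [S_cons_ok c t hc,
        List.dropWhile_cons_of_neg (by simp [allowed_ne_us hc]),
        show List.dropWhile (fun c => !pvAllowed c) (c :: t) = c :: t from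
          List.dropWhile_cons_of_neg (by simp [hc]),
        S_cons_ok c t hc]
    · have hc' : pvAllowed c = false := by simpa using hc
      rw [S_cons_no c t hc',
        List.dropWhile_cons_of_pos (by simp),
        show List.dropWhile (fun c => !pvAllowed c) (c :: t) = t.dropWhile (fun c => !pvAllowed c) from
          List.dropWhile_cons_of_pos (by simp [hc'])]
      rcases drop_head_ok t with h0 | ⟨c', u, h0, hok⟩
      · rw [h0]; simp [pvSqueeze]
      · rw [h0, S_cons_ok c' u hok, List.dropWhile_cons_of_neg (by simp [allowed_ne_us hok])]

theorem stripChars_eq (s : List Char) :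
    PySem.Chars.stripChars s ['_'] = pvRstU (s.dropWhile (· == '_')) := by
  have hq : (fun c : Char => decide (c = '_')) = (fun x : Char => x == '_') :=
    funext (fun c => by by_cases h : c = '_' <;> simp [h])
  simp [PySem.Chars.stripChars, pvRstU, contains_us, hq]

theorem esc_append (a b : List Char) : pvEsc (a ++ b) = pvEsc a ++ pvEsc b := by
  induction a with
  | nil => simp [pvEsc]
  | cons c t ih => simp [pvEsc, ih]

theorem esc_ok (x : List Char) (h : x.all pvAllowed = true) : pvEsc x = x := by
  induction x with
  | nil => rfl
  | cons c t ih =>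
    simp only [List.all_cons, Bool.and_eq_true] at h
    simp [pvEsc, allowed_ne_us h.1, ih h.2]

theorem esc_inter (toks : List (List Char)) (h : ∀ x ∈ toks, x.all pvAllowed = true) :
    pvEsc (List.intercalate ['_'] toks) = List.intercalate ['\\', '_'] toks := by
  match toks with
  | [] => simp [List.intercalate, pvEsc]
  | [x] => simp [List.intercalate, List.intersperse, esc_ok x (h x (by simp))]
  | x :: y :: zs =>
    rw [inter_cons ['_'] x (y :: zs) (by simp), inter_cons ['\\', '_'] x (y :: zs) (by simp)]
    rw [esc_append, esc_append, esc_ok x (h x (by simp)),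
      esc_inter (y :: zs) (fun z hz => h z (List.mem_cons_of_mem x hz))]
    simp [pvEsc]

theorem pvAllowed_eq (c : Char) : pvAllowed c = (PySem.Chars.isalnum c || (c == '=')) := by
  simp only [pvAllowed, PySem.Chars.isalnum, PySem.Chars.isalpha, PySem.Chars.isdigit,
    PySem.Chars.isupper, PySem.Chars.islower]
  rw [Bool.eq_iff_iff]; simp; tauto

theorem alnum_ascii (c : Char) (h : PySem.Chars.isalnum c = true) : c.toNat ≤ 127 := by
  simp [PySem.Chars.isalnum, PySem.Chars.isalpha, PySem.Chars.isdigit,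
    PySem.Chars.isupper, PySem.Chars.islower, Char.le_def, UInt32.le_iff_toNat_le] at h
  have : c.toNat = c.val.toNat := rfl
  rcases h with (h | h) | h <;> omega

theorem pvCleanChar_eq (c : Char) : pvCleanChar c = pvF c := by
  unfold pvCleanChar pvF
  rw [pvAllowed_eq c]
  by_cases h : PySem.Chars.isalnum c = true
  · simp [h, pvIsAscii, alnum_ascii c h]
  · have h' : PySem.Chars.isalnum c = false := by simpa using h
    simp only [h', Bool.false_eq_true, if_false, Bool.false_or]
    by_cases he : c = '='
    · subst he; decide
    · have he' : (c == '=') = false := by simp [he]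
      simp only [he', Bool.false_eq_true, if_false]
      split_ifs <;> rfl

theorem pipeline (l : List Char) :
    PySem.Chars.replace
      (PySem.Chars.stripChars (pvCollapse (l.map pvCleanChar).length (l.map pvCleanChar)) ['_'])
      ['_'] ['\\', '_'] = PySem.Chars.join ['\\', '_'] (pvTokLoop l [] []) := by
  have hmap : l.map pvCleanChar = l.map pvF :=
    List.map_congr_left (fun c _ => pvCleanChar_eq c)
  rw [hmap, collapse_eq_squeeze _ _ (by simp), stripChars_eq, lst_S]
  rw [replace_esc]
  have hmr := main_r (l.dropWhile (fun c => !pvAllowed c)) [] rfl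
  simp only [List.nil_append] at hmr
  rw [hmr, tok_drop l, pfx_drop l]
  by_cases h : pvTokLoop l [] [] = []
  · simp [h, PySem.Chars.join, List.intercalate, pvEsc]
  · rw [if_neg h]
    simp only [if_true, List.nil_append]
    rw [esc_inter _ (tok_all_ok l [] [] rfl (by simp))]
    simp [PySem.Chars.join]

-- ===== VERDICT (by name: the statement is the Claim_ definition above) =====
theorem latex_label_py_spec : Claim_equal_latex_label_py := by
  intro text _
  unfold Spec_latex_label_py latex_label_py latex_label_py_alt
  by_cases h : text = ""
  · rw [if_pos h, if_pos h]
  · rw [if_neg h, if_neg h]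
    exact congrArg String.ofList
      (congrArg (fun x => "\\mathrm{".toList ++ x ++ ['}']) (pipeline text.toList))
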